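-- pv_equiv track=rewrite | github.com/keigimenez/TPSAYED1 | Tp3/ej5.py | butacas_contiguas
-- ===== SOURCE A (Python) =====
-- def butacas_contiguas(sala):
--     coordenadas = []
--     for i, fila in enumerate(sala):
--         count = 0
--         for j in range(len(fila)):
--             if fila[j] == 'Libre':
--                 count += 1
--                 if count == 1:
--                     inicio = j
--             else:
--                 if count > 1:
--                     coordenadas.append((i, inicio))
--                 count = 0
--         if count > 1:  # Para el caso de que la fila termine con butacas libres
--             coordenadas.append((i, inicio))
--     return coordenadas
-- ===== SOURCE B (Python) =====
-- def _rle(seq):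
--     # run-length encoding: list of (value, length) in order
--     runs = []
--     for x in seq:
--         if runs and runs[-1][0] == x:
--             runs[-1] = (x, runs[-1][1] + 1)
--         else:
--             runs.append((x, 1))
--     return runs
--
-- def butacas_contiguas(sala):
--     # Staged: run-length encode each row, then filter 'Libre' runs of length > 1,
--     # recovering each run's start column as the running sum of previous run lengths.
--     coordenadas = []
--     for i, fila in enumerate(sala):
--         j = 0
--         for value, length in _rle(fila):
--             if value == 'Libre' and length > 1:
--                 coordenadas.append((i, j))
--             j += length
--     return coordenadas
-- ===== Notes on version B (the rewrite author's own statement) =====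
-- stated objective: alternative
-- what changed: Replaces A's single-pass count/inicio state machine (with its end-of-row special case) by a staged groupby-style algorithm: run-length encode each row first, then scan the run list filtering 'Libre' runs of length > 1 with the start column as a running sum of run lengths.
import Mathlib
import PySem

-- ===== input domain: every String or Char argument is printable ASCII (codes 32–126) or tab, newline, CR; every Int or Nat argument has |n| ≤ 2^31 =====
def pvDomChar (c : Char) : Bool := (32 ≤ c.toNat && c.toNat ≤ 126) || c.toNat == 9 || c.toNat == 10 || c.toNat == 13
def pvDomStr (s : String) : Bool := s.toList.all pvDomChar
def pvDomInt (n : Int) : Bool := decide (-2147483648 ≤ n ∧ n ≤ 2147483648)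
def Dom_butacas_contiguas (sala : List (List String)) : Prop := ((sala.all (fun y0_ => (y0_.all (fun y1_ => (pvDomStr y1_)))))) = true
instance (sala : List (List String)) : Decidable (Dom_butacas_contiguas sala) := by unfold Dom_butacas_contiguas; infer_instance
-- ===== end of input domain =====

-- B replaces A's count/inicio state machine (with its end-of-row special case) by a staged
-- groupby-style algorithm: run-length encode each row, then filter the runs; same cost.

-- ===== PORT A =====
-- inner loop of A over one row: state (count, inicio); `fila[j]` at index j in range is the
-- current element, so the loop is recursion over the row carrying j (exact).
def pvRowA (i : Int) : List String → Int → Nat → Int → List (Int × Int)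
  | [], _, count, inicio =>
      -- "if count > 1: coordenadas.append((i, inicio))" after the loop
      if count > 1 then [(i, inicio)] else []
  | x :: xs, j, count, inicio =>
      if x = "Libre" then
        pvRowA i xs (j + 1) (count + 1) (if count + 1 = 1 then j else inicio)
      else
        (if count > 1 then [(i, inicio)] else []) ++ pvRowA i xs (j + 1) 0 inicio

def butacas_contiguas (sala : List (List String)) : List (Int × Int) :=
  (PySem.List.enumerate sala).foldl
    (fun coordenadas p => coordenadas ++ pvRowA p.1 p.2 0 0 0) []

-- ===== PORT B =====
-- B's `_rle`: append-at-end / update-last on a Python list is transcribed as cons / update-head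
-- on the reversed list, reversed once at the end (exact).
def pvRle (seq : List String) : List (String × Nat) :=
  (seq.foldl
    (fun runs x =>
      match runs with
      | (v, n) :: rest => if v = x then (x, n + 1) :: rest else (x, 1) :: (v, n) :: rest
      | [] => [(x, 1)])
    []).reverse

-- B's inner loop over the run list, carrying the running column offset j
def pvRowB (i : Int) : List (String × Nat) → Int → List (Int × Int)
  | [], _ => []
  | (value, length) :: rs, j =>
      (if value = "Libre" ∧ length > 1 then [(i, j)] else []) ++ pvRowB i rs (j + length)

def butacas_contiguas_alt (sala : List (List String)) : List (Int × Int) :=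
  (PySem.List.enumerate sala).foldl
    (fun coordenadas p => coordenadas ++ pvRowB p.1 (pvRle p.2) 0) []

-- ===== PRECONDITION & SPEC =====
def Spec_butacas_contiguas (sala : List (List String)) (out : List (Int × Int)) : Prop := out = butacas_contiguas_alt sala
instance (sala : List (List String)) (out : List (Int × Int)) : Decidable (Spec_butacas_contiguas sala out) := by unfold Spec_butacas_contiguas; infer_instance

-- ===== CLAIM (what is proved, stated in full; the proofs are below) =====
def Claim_equal_butacas_contiguas : Prop := ∀ (sala : List (List String)), Dom_butacas_contiguas sala → Spec_butacas_contiguas sala (butacas_contiguas sala)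

-- ===== LEMMAS AND PROOFS =====

-- front-recursive run-length encoding helpers (proof-only): pvCB v n xs extends the current
-- run (v, n) through xs; pvRLE is the resulting RLE of a whole list.
def pvCB (v : String) (n : Nat) : List String → List (String × Nat)
  | [] => [(v, n)]
  | x :: xs => if x = v then pvCB v (n + 1) xs else (v, n) :: pvCB x 1 xs

def pvRLE : List String → List (String × Nat)
  | [] => []
  | x :: xs => pvCB x 1 xs

theorem pvRle_foldl (xs : List String) : ∀ (v : String) (n : Nat) (rest : List (String × Nat)),
    xs.foldl
      (fun runs x =>
        match runs with
        | (v, n) :: rest => if v = x then (x, n + 1) :: rest else (x, 1) :: (v, n) :: rest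
        | [] => [(x, 1)])
      ((v, n) :: rest) = (pvCB v n xs).reverse ++ rest := by
  induction xs with
  | nil => intro v n rest; simp [pvCB]
  | cons x xs ih =>
      intro v n rest
      simp only [List.foldl_cons]
      by_cases h : v = x
      · subst h; rw [if_pos rfl, ih]; simp [pvCB]
      · rw [if_neg h, ih]
        have h' : ¬ x = v := fun e => h e.symm
        simp [pvCB, h']

theorem pvRle_eq_pvRLE (xs : List String) : pvRle xs = pvRLE xs := by
  cases xs with
  | nil => rfl
  | cons x xs => unfold pvRle; simp only [List.foldl_cons]; rw [pvRle_foldl]; simp [pvRLE]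

-- Main invariant: A's state machine at suffix xs equals B's scan over the run list, in each of
-- the three reachable shapes of A's state (count = 0 at a fresh position; inside a "Libre" run
-- of length count started at inicio; just after a non-"Libre" run already consumed by pvCB).
theorem pvRow_main (i : Int) : ∀ (xs : List String) (j : Int),
    (∀ inicio, pvRowA i xs j 0 inicio = pvRowB i (pvRLE xs) j)
    ∧ (∀ (count : Nat) inicio, 1 ≤ count →
        pvRowA i xs (inicio + count) count inicio = pvRowB i (pvCB "Libre" count xs) inicio)
    ∧ (∀ (v : String) (n : Nat) inicio, v ≠ "Libre" →
        pvRowA i xs j 0 inicio = pvRowB i (pvCB v n xs) (j - n)) := by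
  intro xs
  induction xs with
  | nil =>
      intro j
      refine ⟨fun inicio => by simp [pvRowA, pvRLE, pvRowB], ?_, ?_⟩
      · intro count inicio hc
        simp only [pvRowA, pvCB, pvRowB]
        rcases Nat.lt_or_ge 1 count with h | h
        · simp [h]
        · have h1 : count = 1 := by omega
          subst h1; simp
      · intro v n inicio hv
        simp [pvRowA, pvCB, pvRowB, hv]
  | cons x xs ih =>
      intro j
      refine ⟨?_, ?_, ?_⟩
      · intro inicio
        by_cases hx : x = "Libre"
        · subst hx
          simp only [pvRowA, pvRLE]
          have := ((ih (j + 1)).2.1 1 j (le_refl 1))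
          simpa using this
        · simp only [pvRowA, if_neg hx, pvRLE]
          have := ((ih (j + 1)).2.2 x 1 inicio hx)
          simp only [Nat.cast_one, add_sub_cancel_right] at this
          simpa using this
      · intro count inicio hc
        by_cases hx : x = "Libre"
        · subst hx
          simp only [pvRowA, pvCB]
          have hne : ¬ count + 1 = 1 := by omega
          rw [if_neg hne]
          have := ((ih (inicio + count + 1)).2.1 (count + 1) inicio (by omega))
          have harith : inicio + (count : Int) + 1 = inicio + ((count : Nat) + 1 : Nat) := by
            push_cast; ring
          rw [harith]
          exact this
        · simp only [pvRowA, if_neg hx, pvCB, pvRowB]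
          have := ((ih (inicio + count + 1)).2.2 x 1 inicio hx)
          simp only [Nat.cast_one] at this
          rw [show inicio + (count : Int) + 1 - 1 = inicio + count from by ring] at this
          rw [this]
          simp
      · intro v n inicio hv
        by_cases hxv : x = v
        · subst hxv
          have hx : ¬ x = "Libre" := hv
          simp only [pvRowA, if_neg hx, pvCB]
          have := ((ih (j + 1)).2.2 x (n + 1) inicio hv)
          have harith : j + 1 - ((n : Nat) + 1 : Nat) = j - n := by push_cast; ring
          rw [harith] at this
          simpa using this
        · have hcond : ¬ (v = "Libre" ∧ n > 1) := fun h => hv h.1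
          simp only [pvCB, if_neg hxv, pvRowB, if_neg hcond, List.nil_append]
          have hoff : j - (n : Int) + (n : Int) = j := by ring
          rw [hoff]
          by_cases hx : x = "Libre"
          · subst hx
            simp only [pvRowA]
            have := ((ih (j + 1)).2.1 1 j (le_refl 1))
            simpa using this
          · simp only [pvRowA, if_neg hx]
            have := ((ih (j + 1)).2.2 x 1 inicio hx)
            simp only [Nat.cast_one, add_sub_cancel_right] at this
            simpa using this

-- ===== VERDICT (by name: the statement is the Claim_ definition above) =====
theorem butacas_contiguas_spec : Claim_equal_butacas_contiguas := by
  intro sala _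
  unfold Spec_butacas_contiguas butacas_contiguas butacas_contiguas_alt
  congr 1
  funext coordenadas p
  rw [pvRle_eq_pvRLE]
  exact congrArg (coordenadas ++ ·) ((pvRow_main p.1 p.2 0).1 0)
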